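-- pv_equiv track=rewrite | github.com/bernie-skipole/exercise | exercise/code/exercise.py | _cumulative_major_intervals
-- ===== SOURCE A (Python) =====
-- def _cumulative_major_intervals(totaltime, sectionlist, major_index):
--     """Returns the cumulative time intervals
--        such that [ t1, t2, t3...]
--        t1 is time first major section ends, and second major section starts
--        t2 is the time the second major section ends, and third major section starts
--        t3 is the time the third major section ends, etc"""
--
--     # a section in the sectionlist is
--     # [ section time in seconds, section title, section text, mp3 file, wav file, ogg file]
--
--     cumulative = []
--     cumulative_time = 0
--
--     for idx, section in enumerate(sectionlist):
--         if major_index[idx] is None: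
--             # no further sections
--             cumulative.append(totaltime)
--             break
--         cumulative_time += section[0]
--         if major_index[idx] == idx+1:
--             # The next section is flagged as the start of the next major section
--             cumulative.append(cumulative_time)
--
--     return cumulative
-- ===== SOURCE B (Python) =====
-- def _cumulative_major_intervals(totaltime, sectionlist, major_index):
--     """Two-pass version: first build the prefix-sum table of section
--     durations up to the first section whose major_index entry is None,
--     then select the major-boundary times from the table, appending
--     totaltime iff the scan stopped early."""
--     # phase 1: prefix sums, stopping at the first None flag
--     prefix = []
--     running = 0
--     for idx, section in enumerate(sectionlist):
--         if major_index[idx] is None: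
--             break
--         running += section[0]
--         prefix.append(running)
--     # phase 2: pick the entries flagged as major-section boundaries
--     result = [p for idx, p in enumerate(prefix) if major_index[idx] == idx + 1]
--     if len(prefix) < len(sectionlist):
--         result.append(totaltime)
--     return result
-- ===== Notes on version B (the rewrite author's own statement) =====
-- stated objective: alternative
-- what changed: A's single stateful scan that interleaves accumulation, selection and the break-sentinel append is split into a prefix-sum table build followed by a separate selection pass, with the totaltime append decided once at the end from the table length.
import Mathlib
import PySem

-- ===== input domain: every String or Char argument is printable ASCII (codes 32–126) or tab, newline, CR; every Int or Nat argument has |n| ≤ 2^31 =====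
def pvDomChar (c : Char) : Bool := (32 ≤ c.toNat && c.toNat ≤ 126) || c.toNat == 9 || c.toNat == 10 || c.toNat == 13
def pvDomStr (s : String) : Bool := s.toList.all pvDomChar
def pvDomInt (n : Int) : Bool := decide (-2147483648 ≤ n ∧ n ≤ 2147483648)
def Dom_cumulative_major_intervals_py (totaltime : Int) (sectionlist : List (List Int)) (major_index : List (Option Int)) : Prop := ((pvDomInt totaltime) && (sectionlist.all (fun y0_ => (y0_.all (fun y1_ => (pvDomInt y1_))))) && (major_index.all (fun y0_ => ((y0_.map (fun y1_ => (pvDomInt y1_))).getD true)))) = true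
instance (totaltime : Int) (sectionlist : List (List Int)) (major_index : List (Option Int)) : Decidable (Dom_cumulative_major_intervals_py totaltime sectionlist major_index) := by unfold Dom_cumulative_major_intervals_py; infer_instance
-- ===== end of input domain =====

-- B splits A's single fused scan into a prefix-sum table build and a separate selection pass (alternative decomposition, same cost).

-- ===== PORT A =====
-- A's single loop: index counter, running cumulative time, emit on boundary flag,
-- emit totaltime and stop at the first None flag.  Where Python raises
-- (major_index[idx] or section[0] IndexError) the port returns the list built so far;
-- Pre_ excludes exactly those inputs.
def cumAloop (totaltime : Int) (major_index : List (Option Int)) :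
    Nat → List (List Int) → Int → List Int
  | _, [], _ => []
  | idx, sec :: rest, ct =>
    match PySem.List.pyGet? major_index ((idx : Nat) : Int) with
    | none => []                         -- IndexError (outside Pre_)
    | some none => [totaltime]           -- append totaltime; break
    | some (some m) =>
      match PySem.List.pyGet? sec 0 with
      | none => []                       -- IndexError (outside Pre_)
      | some s0 =>
        if m = ((idx : Nat) : Int) + 1 then
          (ct + s0) :: cumAloop totaltime major_index (idx + 1) rest (ct + s0)
        else
          cumAloop totaltime major_index (idx + 1) rest (ct + s0)

def cumulative_major_intervals_py (totaltime : Int) (sectionlist : List (List Int)) (major_index : List (Option Int)) : List Int :=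
  cumAloop totaltime major_index 0 sectionlist 0

-- ===== PORT B =====
-- phase 1 of Source B: prefix sums of section[0] up to (excluding) the first None flag
def prefixB (major_index : List (Option Int)) :
    Nat → List (List Int) → Int → List Int
  | _, [], _ => []
  | idx, sec :: rest, running =>
    match PySem.List.pyGet? major_index ((idx : Nat) : Int) with
    | none => []                         -- IndexError (outside Pre_)
    | some none => []                    -- break
    | some (some _) =>
      match PySem.List.pyGet? sec 0 with
      | none => []                       -- IndexError (outside Pre_)
      | some s0 => (running + s0) :: prefixB major_index (idx + 1) rest (running + s0)

-- phase 2 of Source B: the comprehension over enumerate(prefix)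
def selectB (major_index : List (Option Int)) : Nat → List Int → List Int
  | _, [] => []
  | idx, p :: ps =>
    (if PySem.List.pyGet? major_index ((idx : Nat) : Int) = some (some (((idx : Nat) : Int) + 1))
     then [p] else []) ++ selectB major_index (idx + 1) ps

def cumulative_major_intervals_py_alt (totaltime : Int) (sectionlist : List (List Int)) (major_index : List (Option Int)) : List Int :=
  let pre := prefixB major_index 0 sectionlist 0
  let result := selectB major_index 0 pre
  if pre.length < sectionlist.length then result ++ [totaltime] else result

-- ===== PRECONDITION & SPEC =====
-- number of leading non-None entries of major_index (position of the first None, or length)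
def leadSome : List (Option Int) → Nat
  | [] => 0
  | none :: _ => 0
  | some _ :: l => leadSome l + 1

-- Pre_ excludes exactly the inputs on which A raises IndexError: either major_index has
-- no entry at some visited index, or a visited section before the first None flag is empty.
def Pre_cumulative_major_intervals_py (totaltime : Int) (sectionlist : List (List Int)) (major_index : List (Option Int)) : Prop :=
  (leadSome major_index < major_index.length ∨ sectionlist.length ≤ major_index.length) ∧
  ∀ i, i < min sectionlist.length (leadSome major_index) → sectionlist.getD i [] ≠ []
instance (totaltime : Int) (sectionlist : List (List Int)) (major_index : List (Option Int)) : Decidable (Pre_cumulative_major_intervals_py totaltime sectionlist major_index) := by unfold Pre_cumulative_major_intervals_py; infer_instance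

def pvWitness_cumulative_major_intervals_py : Int × List (List Int) × List (Option Int) :=
  (10, [[2], [3], [4]], [some 1, some 3, none])

def Spec_cumulative_major_intervals_py (totaltime : Int) (sectionlist : List (List Int)) (major_index : List (Option Int)) (out : List Int) : Prop := out = cumulative_major_intervals_py_alt totaltime sectionlist major_index
instance (totaltime : Int) (sectionlist : List (List Int)) (major_index : List (Option Int)) (out : List Int) : Decidable (Spec_cumulative_major_intervals_py totaltime sectionlist major_index out) := by unfold Spec_cumulative_major_intervals_py; infer_instance

-- ===== CLAIM (what is proved, stated in full; the proofs are below) =====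
def Claim_equal_cumulative_major_intervals_py : Prop := ∀ (totaltime : Int) (sectionlist : List (List Int)) (major_index : List (Option Int)), Dom_cumulative_major_intervals_py totaltime sectionlist major_index → Pre_cumulative_major_intervals_py totaltime sectionlist major_index → Spec_cumulative_major_intervals_py totaltime sectionlist major_index (cumulative_major_intervals_py totaltime sectionlist major_index)

-- ===== LEMMAS AND PROOFS =====

-- the accesses A actually performs, along its trace starting at index idx
def OkTrace (major_index : List (Option Int)) : Nat → List (List Int) → Prop
  | _, [] => True
  | idx, sec :: rest =>
    match major_index[idx]? with
    | none => False
    | some none => True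
    | some (some _) => sec ≠ [] ∧ OkTrace major_index (idx + 1) rest

lemma getElem?_lt_leadSome (l : List (Option Int)) (i : Nat) (h : i < leadSome l) :
    ∃ m, l[i]? = some (some m) := by
  induction l generalizing i with
  | nil => simp [leadSome] at h
  | cons hd t ih =>
    cases hd with
    | none => simp [leadSome] at h
    | some m =>
      cases i with
      | zero => exact ⟨m, rfl⟩
      | succ j =>
        have := ih j (by simp [leadSome] at h; omega)
        simpa using this

lemma getElem?_at_leadSome (l : List (Option Int)) (h : leadSome l < l.length) :
    l[leadSome l]? = some none := by
  induction l with
  | nil => simp at h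
  | cons hd t ih =>
    cases hd with
    | none => simp [leadSome]
    | some m =>
      have := ih (by simp [leadSome] at h ⊢; omega)
      simpa [leadSome] using this

lemma pre_okTrace (sl : List (List Int)) (mi : List (Option Int)) (i : Nat)
    (hle : i ≤ leadSome mi)
    (hb : leadSome mi < mi.length ∨ i + sl.length ≤ mi.length)
    (hs : ∀ j, j < min sl.length (leadSome mi - i) → sl.getD j [] ≠ []) :
    OkTrace mi i sl := by
  induction sl generalizing i with
  | nil => trivial
  | cons sec rest ih =>
    simp only [OkTrace]
    by_cases hi : i < leadSome mi
    · obtain ⟨m, hm⟩ := getElem?_lt_leadSome mi i hi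
      rw [hm]
      refine ⟨?_, ih (i + 1) (by omega) ?_ ?_⟩
      · have := hs 0 (by simp; omega)
        simpa using this
      · rcases hb with hb | hb
        · exact Or.inl hb
        · exact Or.inr (by simp at hb ⊢; omega)
      · intro j hj
        have := hs (j + 1) (by simp at hj ⊢; omega)
        simpa using this
    · have hieq : i = leadSome mi := by omega
      have hlt : leadSome mi < mi.length := by
        rcases hb with hb | hb
        · exact hb
        · simp at hb; omega
      rw [hieq, getElem?_at_leadSome mi hlt]
      trivial

-- main invariant: A's fused loop = select pass over the prefix table, plus [totaltime]
-- exactly when the table is shorter than the remaining section list (i.e. the loop broke)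
lemma main_inv (tt : Int) (mi : List (Option Int)) (sl : List (List Int)) (i : Nat) (ct : Int)
    (hok : OkTrace mi i sl) :
    cumAloop tt mi i sl ct =
      selectB mi i (prefixB mi i sl ct) ++
        (if (prefixB mi i sl ct).length < sl.length then [tt] else []) := by
  induction sl generalizing i ct with
  | nil => simp [cumAloop, prefixB, selectB]
  | cons sec rest ih =>
    simp only [OkTrace] at hok
    simp only [cumAloop, prefixB, PySem.List.pyGet?_natCast]
    cases hmi : mi[i]? with
    | none => rw [hmi] at hok; exact hok.elim
    | some o =>
      rw [hmi] at hok
      cases o with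
      | none => simp [selectB]
      | some m =>
        obtain ⟨hsec, hok'⟩ := hok
        obtain ⟨s0, tl, rfl⟩ : ∃ s0 tl, sec = s0 :: tl := by
          cases sec with
          | nil => exact absurd rfl hsec
          | cons a b => exact ⟨a, b, rfl⟩
        rw [PySem.List.pyGet?_zero_cons s0 tl]
        have ihct := ih (i + 1) (ct + s0) hok'
        simp only [selectB, PySem.List.pyGet?_natCast, hmi, List.length_cons,
          Nat.add_lt_add_iff_right, ihct]
        by_cases hm : m = (i : Int) + 1 <;> simp [hm]

-- ===== VERDICT (by name: the statement is the Claim_ definition above) =====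
theorem cumulative_major_intervals_py_spec : Claim_equal_cumulative_major_intervals_py := by
  intro tt sl mi _ hpre
  obtain ⟨hb, hs⟩ := hpre
  have hok : OkTrace mi 0 sl :=
    pre_okTrace sl mi 0 (Nat.zero_le _) (by omega) (by simpa using hs)
  unfold Spec_cumulative_major_intervals_py cumulative_major_intervals_py
    cumulative_major_intervals_py_alt
  rw [main_inv tt mi sl 0 0 hok]
  by_cases h : (prefixB mi 0 sl 0).length < sl.length <;> simp [h]
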